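-- pv_equiv track=rewrite | github.com/HillsboroLLC/sekki-platform | backend/app/routes/strategy.py | _resolve_session_entry
-- ===== SOURCE A (Python) =====
-- def _resolve_session_entry(sessions, thread_id):
--     """Resolve a session payload by map key or embedded session_id."""
--     tid = str(thread_id or '').strip()
--     if not tid or not isinstance(sessions, dict):
--         return None, None
--     if tid in sessions:
--         return tid, sessions.get(tid)
--     for key, candidate in sessions.items():
--         if str((candidate or {}).get('session_id', '')).strip() == tid:
--             return key, candidate
--     return None, None
-- ===== SOURCE B (Python) =====
-- def _resolve_session_entry(sessions, thread_id):
--     """Resolve a session payload by map key or embedded session_id.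
--
--     Filter-then-select: collect every matching entry with a rank
--     (0 = key match, 1 = embedded session_id match), then pick the
--     best-ranked one (min is stable, so ties keep insertion order).
--     """
--     tid = str(thread_id or '').strip()
--     if not tid or not isinstance(sessions, dict):
--         return None, None
--     ranked = [(0 if key == tid else 1, key, candidate)
--               for key, candidate in sessions.items()
--               if key == tid
--               or str((candidate or {}).get('session_id', '')).strip() == tid]
--     if not ranked:
--         return None, None
--     _, key, candidate = min(ranked, key=lambda t: t[0])
--     return key, candidate
-- ===== Notes on version B (the rewrite author's own statement) =====
-- stated objective: alternative
-- what changed: Replaces A's key-membership fast path plus separate session_id scan with a filter-then-select scheme: build one list of all matching entries tagged with a rank (0 key match, 1 session_id match) and pick the first minimal-rank entry with a stable min.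
import Mathlib
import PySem

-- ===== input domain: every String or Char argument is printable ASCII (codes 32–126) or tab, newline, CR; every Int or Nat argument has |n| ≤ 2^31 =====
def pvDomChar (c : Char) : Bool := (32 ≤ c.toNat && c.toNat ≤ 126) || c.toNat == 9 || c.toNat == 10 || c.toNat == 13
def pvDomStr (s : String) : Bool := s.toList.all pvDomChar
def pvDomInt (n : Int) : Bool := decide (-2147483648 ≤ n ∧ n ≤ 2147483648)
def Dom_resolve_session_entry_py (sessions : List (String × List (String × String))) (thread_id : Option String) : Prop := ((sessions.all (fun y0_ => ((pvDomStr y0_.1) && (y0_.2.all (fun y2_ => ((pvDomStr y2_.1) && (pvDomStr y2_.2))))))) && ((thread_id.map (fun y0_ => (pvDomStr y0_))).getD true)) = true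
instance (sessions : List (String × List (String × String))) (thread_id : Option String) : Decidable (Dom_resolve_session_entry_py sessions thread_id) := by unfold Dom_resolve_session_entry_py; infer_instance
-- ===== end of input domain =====

-- B replaces A's key-membership fast path + separate session_id scan by filter-then-select:
-- collect all matches tagged with a rank and pick the first minimal-rank one; objective: alternative.

-- ===== PORT A =====
-- first-match lookup in an assoc list with a default (Python dict .get(k, dflt))
def pvGetD (d : List (String × String)) (k dflt : String) : String :=
  match d with
  | [] => dflt
  | (k', v) :: rest => if k' = k then v else pvGetD rest k dflt

-- A's "tid in sessions" membership test
def pvHasKey (d : List (String × List (String × String))) (k : String) : Bool :=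
  match d with
  | [] => false
  | (k', _) :: rest => if k' = k then true else pvHasKey rest k

-- A's sessions.get(tid)
def pvGet? (d : List (String × List (String × String))) (k : String) : Option (List (String × String)) :=
  match d with
  | [] => none
  | (k', v) :: rest => if k' = k then some v else pvGet? rest k

-- A's for-loop over sessions.items() scanning for an embedded session_id match
def pvScanA (d : List (String × List (String × String))) (tid : String) : Option String × (Option (List (String × String))) :=
  match d with
  | [] => (none, none)
  | (key, candidate) :: rest =>
      if PySem.Str.strip (pvGetD candidate "session_id" "") = tid then (some key, some candidate)
      else pvScanA rest tid

-- literal port of A: normalize, membership fast path, then the session_id scan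
def resolve_session_entry_py (sessions : List (String × List (String × String))) (thread_id : Option String) : Option String × (Option (List (String × String))) :=
  let tid := PySem.Str.strip (thread_id.getD "")
  if tid = "" then (none, none)
  else if pvHasKey sessions tid then (some tid, pvGet? sessions tid)
  else pvScanA sessions tid

-- ===== PORT B =====
-- B's list comprehension: every matching entry, tagged with its rank (0 = key match, 1 = session_id match)
def pvRanked (d : List (String × List (String × String))) (tid : String) :
    List (Int × String × List (String × String)) :=
  match d with
  | [] => []
  | (key, candidate) :: rest =>
      if key = tid ∨ PySem.Str.strip (pvGetD candidate "session_id" "") = tid then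
        ((if key = tid then (0:Int) else 1), key, candidate) :: pvRanked rest tid
      else pvRanked rest tid

-- Python's min(ranked, key=λt. t[0]): running minimum keeping the FIRST minimal element (strict <)
def pvMinByRank (h : Int × String × List (String × String))
    (t : List (Int × String × List (String × String))) : Int × String × List (String × String) :=
  t.foldl (fun best x => if x.1 < best.1 then x else best) h

-- port of B (Source B): filter with ranks, then stable min selection
def resolve_session_entry_py_alt (sessions : List (String × List (String × String))) (thread_id : Option String) : Option String × (Option (List (String × String))) :=
  let tid := PySem.Str.strip (thread_id.getD "")
  if tid = "" then (none, none)
  else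
    match pvRanked sessions tid with
    | [] => (none, none)
    | h :: t =>
        let m := pvMinByRank h t
        (some m.2.1, some m.2.2)

-- ===== PRECONDITION & SPEC =====
def Spec_resolve_session_entry_py (sessions : List (String × List (String × String))) (thread_id : Option String) (out : Option String × (Option (List (String × String)))) : Prop := out = resolve_session_entry_py_alt sessions thread_id
instance (sessions : List (String × List (String × String))) (thread_id : Option String) (out : Option String × (Option (List (String × String)))) : Decidable (Spec_resolve_session_entry_py sessions thread_id out) := by unfold Spec_resolve_session_entry_py; infer_instance

-- ===== CLAIM =====
def Claim_equal_resolve_session_entry_py : Prop := ∀ (sessions : List (String × List (String × String))) (thread_id : Option String), Dom_resolve_session_entry_py sessions thread_id → Spec_resolve_session_entry_py sessions thread_id (resolve_session_entry_py sessions thread_id)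

-- ===== LEMMAS AND PROOFS =====

-- key membership determines whether pvGet? yields a value
theorem pvHasKey_some (d : List (String × List (String × String))) (tid : String)
    (hkey : pvHasKey d tid = true) : ∃ c, pvGet? d tid = some c := by
  induction d with
  | nil => simp [pvHasKey] at hkey
  | cons z zs ihz =>
      obtain ⟨zk, zv⟩ := z
      by_cases hz : zk = tid
      · exact ⟨zv, by simp [pvGet?, hz]⟩
      · simp only [pvHasKey, if_neg hz] at hkey
        obtain ⟨c, hc⟩ := ihz hkey
        exact ⟨c, by simp [pvGet?, hz, hc]⟩

theorem pvHasKey_none (d : List (String × List (String × String))) (tid : String)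
    (hkey : ¬ pvHasKey d tid = true) : pvGet? d tid = none := by
  induction d with
  | nil => simp [pvGet?]
  | cons z zs ihz =>
      obtain ⟨zk, zv⟩ := z
      by_cases hz : zk = tid
      · simp [pvHasKey, hz] at hkey
      · simp only [pvHasKey, if_neg hz] at hkey
        simp [pvGet?, hz, ihz hkey]

-- every rank produced by pvRanked is 0 or 1
theorem pvRanked_ranks (d : List (String × List (String × String))) (tid : String) :
    ∀ x ∈ pvRanked d tid, x.1 = 0 ∨ x.1 = 1 := by
  induction d with
  | nil => simp [pvRanked]
  | cons hd tl ih =>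
      obtain ⟨key, candidate⟩ := hd
      intro x hx
      by_cases hm : key = tid ∨ PySem.Str.strip (pvGetD candidate "session_id" "") = tid
      · simp only [pvRanked, if_pos hm, List.mem_cons] at hx
        rcases hx with rfl | hx
        · by_cases hk : key = tid <;> simp [hk]
        · exact ih x hx
      · simp only [pvRanked, if_neg hm] at hx
        exact ih x hx

-- the first rank-0 element of pvRanked is A's key lookup
theorem pvRanked_findZero (d : List (String × List (String × String))) (tid : String) :
    List.find? (fun x => x.1 == (0:Int)) (pvRanked d tid)
      = (pvGet? d tid).map (fun c => ((0:Int), tid, c)) := by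
  induction d with
  | nil => simp [pvRanked, pvGet?]
  | cons hd tl ih =>
      obtain ⟨key, candidate⟩ := hd
      by_cases hk : key = tid
      · subst hk
        simp [pvRanked, pvGet?]
      · by_cases hs : PySem.Str.strip (pvGetD candidate "session_id" "") = tid
        · simp [pvRanked, pvGet?, hk, hs, ih]
        · simp [pvRanked, pvGet?, hk, hs, ih]

-- stable min over {0,1} ranks: keep a rank-0 head, else jump to the first rank-0 element
theorem pvMinByRank_char (t : List (Int × String × List (String × String)))
    (h : Int × String × List (String × String))
    (ht : ∀ x ∈ t, x.1 = 0 ∨ x.1 = 1) (hh : h.1 = 0 ∨ h.1 = 1) :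
    pvMinByRank h t =
      if h.1 = 0 then h else (List.find? (fun x => x.1 == (0:Int)) t).getD h := by
  induction t generalizing h with
  | nil =>
      rcases hh with h0 | h1
      · simp [pvMinByRank, h0]
      · simp [pvMinByRank, h1]
  | cons x t ih =>
      have hx := ht x (by simp)
      have ht' : ∀ y ∈ t, y.1 = 0 ∨ y.1 = 1 := fun y hy => ht y (by simp [hy])
      have step : pvMinByRank h (x :: t) = pvMinByRank (if x.1 < h.1 then x else h) t := by
        simp [pvMinByRank, List.foldl_cons]
      rcases hh with h0 | h1
      · have hlt : ¬ x.1 < h.1 := by rcases hx with hx0 | hx1 <;> omega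
        rw [step, if_neg hlt, ih h ht' (Or.inl h0), if_pos h0, if_pos h0]
      · rcases hx with hx0 | hx1
        · have hlt : x.1 < h.1 := by omega
          rw [step, if_pos hlt, ih x ht' (Or.inl hx0), if_pos hx0]
          simp [h1, List.find?, hx0]
        · have hlt : ¬ x.1 < h.1 := by omega
          rw [step, if_neg hlt, ih h ht' (Or.inr h1), if_neg (by omega : ¬ h.1 = 0),
              if_neg (by omega : ¬ h.1 = 0)]
          have : (x.1 == (0:Int)) = false := by simp [hx1]
          simp [List.find?, this]

-- B's whole selection equals A's fast path / scan combination
theorem selection_eq (d : List (String × List (String × String))) (tid : String) :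
    (match pvRanked d tid with
     | [] => ((none, none) : Option String × (Option (List (String × String))))
     | h :: t => let m := pvMinByRank h t; (some m.2.1, some m.2.2))
      = if pvHasKey d tid then (some tid, pvGet? d tid) else pvScanA d tid := by
  induction d with
  | nil => simp [pvRanked, pvHasKey, pvScanA]
  | cons hd tl ih =>
      obtain ⟨key, candidate⟩ := hd
      by_cases hk : key = tid
      · subst hk
        have hr : pvRanked ((key, candidate) :: tl) key
            = ((0:Int), key, candidate) :: pvRanked tl key := by
          simp [pvRanked]
        rw [hr]
        have := pvMinByRank_char (pvRanked tl key) ((0:Int), key, candidate)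
          (pvRanked_ranks tl key) (Or.inl rfl)
        simp only [this]
        simp [pvHasKey, pvGet?]
      · by_cases hs : PySem.Str.strip (pvGetD candidate "session_id" "") = tid
        · have hr : pvRanked ((key, candidate) :: tl) tid
              = ((1:Int), key, candidate) :: pvRanked tl tid := by
            simp [pvRanked, hk, hs]
          rw [hr]
          have hmin := pvMinByRank_char (pvRanked tl tid) ((1:Int), key, candidate)
            (pvRanked_ranks tl tid) (Or.inr rfl)
          simp only [hmin, pvRanked_findZero]
          by_cases hkey : pvHasKey tl tid
          · obtain ⟨c, hc⟩ := pvHasKey_some tl tid hkey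
            simp [hc, pvHasKey, pvGet?, hk, hkey]
          · simp [pvHasKey_none tl tid hkey, pvHasKey, pvScanA, hk, hkey, hs]
        · have hr : pvRanked ((key, candidate) :: tl) tid = pvRanked tl tid := by
            simp [pvRanked, hk, hs]
          rw [hr, ih]
          simp [pvHasKey, pvGet?, pvScanA, hk, hs]

theorem resolve_session_entry_py_eq (sessions : List (String × List (String × String))) (thread_id : Option String) :
    resolve_session_entry_py sessions thread_id = resolve_session_entry_py_alt sessions thread_id := by
  unfold resolve_session_entry_py resolve_session_entry_py_alt
  by_cases h : PySem.Str.strip (thread_id.getD "") = ""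
  · simp [h]
  · simp only [if_neg h]
    exact (selection_eq sessions (PySem.Str.strip (thread_id.getD ""))).symm

-- ===== VERDICT =====
theorem resolve_session_entry_py_spec : Claim_equal_resolve_session_entry_py := by
  intro sessions thread_id _
  unfold Spec_resolve_session_entry_py
  exact resolve_session_entry_py_eq sessions thread_id
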